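-- pv_equiv track=rewrite | github.com/FirstEnchanter/Research_Discovery_Agent | main.py | map_row_data
-- ===== SOURCE A (Python) =====
-- def map_row_data(data_dict, headers):
--     """
--     Dynamically maps a dictionary of data to a row based on header names.
--     Uses case-insensitive matching and stripping to stay robust against manual sheet edits.
--     """
--     row = [None] * len(headers)
--
--     # Create a normalized mapping of data_dict keys
--     norm_data = {str(k).strip().lower(): v for k, v in data_dict.items()}
--
--     for i, header in enumerate(headers):
--         h_norm = str(header).strip().lower()
--         if h_norm in norm_data:
--             row[i] = norm_data[h_norm]
--     return row
-- ===== SOURCE B (Python) =====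
-- def map_row_data(data_dict, headers):
--     """B: index headers by normalized name (one table pass), then loop over the
--     data items and write each value into every matching header position."""
--     positions = {}
--     for i, h in enumerate(headers):
--         positions.setdefault(str(h).strip().lower(), []).append(i)
--     row = [None] * len(headers)
--     for k, v in data_dict.items():
--         for i in positions.get(str(k).strip().lower(), []):
--             row[i] = v
--     return row
-- ===== Notes on version B (the rewrite author's own statement) =====
-- stated objective: alternative
-- what changed: B inverts the traversal: it builds a header-name -> positions index once and iterates over the data items writing into the row, instead of normalizing the data into a dict and scanning the headers with lookups.
import Mathlib
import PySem

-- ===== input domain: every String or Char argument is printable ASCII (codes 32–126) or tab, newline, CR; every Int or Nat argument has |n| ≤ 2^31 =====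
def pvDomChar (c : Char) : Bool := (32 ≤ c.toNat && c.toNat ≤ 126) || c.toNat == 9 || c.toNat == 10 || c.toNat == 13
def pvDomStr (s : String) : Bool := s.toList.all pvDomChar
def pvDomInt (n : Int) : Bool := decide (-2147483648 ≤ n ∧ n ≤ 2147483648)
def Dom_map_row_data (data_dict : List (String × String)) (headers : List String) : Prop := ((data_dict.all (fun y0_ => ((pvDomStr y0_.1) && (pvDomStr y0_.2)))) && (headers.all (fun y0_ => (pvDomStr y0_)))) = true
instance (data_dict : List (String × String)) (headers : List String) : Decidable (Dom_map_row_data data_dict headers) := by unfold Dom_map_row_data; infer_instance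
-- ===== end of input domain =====

-- B inverts the traversal: a header-name -> positions index built once, then one pass over the
-- data items writing into the row (alternative decomposition; same return value as A).


-- str(k).strip().lower() (keys are already strings, so str() is the identity)
def pvNorm (s : String) : String := PySem.Str.lower (PySem.Str.strip s)

-- ===== PORT A =====
def map_row_data (data_dict : List (String × String)) (headers : List String) : List (Option String) :=
  let row : List (Option String) := List.replicate headers.length none
  let norm_data : PySem.Dict String String :=
    data_dict.foldl (fun d kv => d.insert (pvNorm kv.1) kv.2) PySem.Dict.empty
  (PySem.List.enumerate headers 0).foldl
    (fun row p =>
      let hn := pvNorm p.2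
      if norm_data.contains hn then PySem.List.pySetD row p.1 (norm_data.get? hn) else row)
    row

-- ===== PORT B =====
def map_row_data_alt (data_dict : List (String × String)) (headers : List String) : List (Option String) :=
  let positions : PySem.Dict String (List Int) :=
    (PySem.List.enumerate headers 0).foldl
      (fun d p => d.modify (pvNorm p.2) [] (· ++ [p.1])) PySem.Dict.empty
  let row : List (Option String) := List.replicate headers.length none
  data_dict.foldl
    (fun row kv =>
      (positions.getD (pvNorm kv.1) []).foldl
        (fun r i => PySem.List.pySetD r i (some kv.2)) row)
    row

-- ===== PRECONDITION & SPEC =====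
def Spec_map_row_data (data_dict : List (String × String)) (headers : List String) (out : List (Option String)) : Prop := out = map_row_data_alt data_dict headers
instance (data_dict : List (String × String)) (headers : List String) (out : List (Option String)) : Decidable (Spec_map_row_data data_dict headers out) := by unfold Spec_map_row_data; infer_instance

-- ===== CLAIM (what is proved, stated in full; the proofs are below) =====
def Claim_equal_map_row_data : Prop := ∀ (data_dict : List (String × String)) (headers : List String), Dom_map_row_data data_dict headers → Spec_map_row_data data_dict headers (map_row_data data_dict headers)

-- ===== LEMMAS AND PROOFS =====

-- a foldl whose step preserves length preserves length
theorem pv_foldl_len {α β : Type} (f : List α → β → List α) (l : List β)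
    (hf : ∀ r x, (f r x).length = r.length) :
    ∀ r : List α, (l.foldl f r).length = r.length := by
  induction l with
  | nil => intro r; rfl
  | cons x l ih => intro r; simp [List.foldl_cons, ih, hf]

-- lookup in the dict A builds = last matching data entry
theorem pv_dictA_get (l : List (String × String)) :
    ∀ (d : PySem.Dict String String) (k : String),
    (l.foldl (fun d kv => d.insert (pvNorm kv.1) kv.2) d).get? k
      = match l.reverse.find? (fun kv => pvNorm kv.1 == k) with
        | some kv => some kv.2
        | none => d.get? k := by
  induction l with
  | nil => intro d k; rfl
  | cons kv l ih =>
    intro d k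
    simp only [List.foldl_cons, List.reverse_cons, List.find?_append, ih]
    cases h : l.reverse.find? (fun kv => pvNorm kv.1 == k) with
    | some p => simp
    | none =>
      simp only [Option.orElse_eq_or, Option.none_or]
      by_cases hk : pvNorm kv.1 = k
      · simp [List.find?, hk, PySem.Dict.get?_insert]
      · rw [List.find?_cons_of_neg (by simp [hk])]
        simp [PySem.Dict.get?_insert, Ne.symm hk]

-- B's positions table: getD k [] = indices of headers normalizing to k, in order
theorem pv_positions_getD (hs : List (Int × String)) :
    ∀ (d : PySem.Dict String (List Int)) (k : String),
    (hs.foldl (fun d p => d.modify (pvNorm p.2) [] (· ++ [p.1])) d).getD k []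
      = d.getD k [] ++ (hs.filter (fun p => pvNorm p.2 == k)).map (·.1) := by
  induction hs with
  | nil => intro d k; simp
  | cons p hs ih =>
    intro d k
    simp only [List.foldl_cons, ih, List.filter_cons]
    by_cases hk : pvNorm p.2 = k
    · simp [hk, PySem.Dict.getD_modify]
    · simp [hk, PySem.Dict.getD_modify, Ne.symm hk]

-- inner write loop of B
theorem pv_setfold_get (is : List Int) :
    ∀ (r : List (Option String)) (v : Option String) (j : Nat),
    (∀ i ∈ is, 0 ≤ i ∧ i < (r.length : Int)) →
    (is.foldl (fun r i => PySem.List.pySetD r i v) r)[j]?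
      = if (j : Int) ∈ is then some v else r[j]? := by
  induction is with
  | nil => intro r v j _; simp
  | cons i is ih =>
    intro r v j hall
    obtain ⟨hi0, hilen⟩ := hall i (by simp)
    have hlen : (PySem.List.pySetD r i v).length = r.length := PySem.List.length_pySetD ..
    rw [List.foldl_cons, ih _ _ _ (by intro a ha; rw [hlen]; exact hall a (List.mem_cons_of_mem _ ha))]
    by_cases hmem : (j : Int) ∈ is
    · simp [hmem]
    · simp only [hmem, if_false, List.mem_cons, or_false]
      rw [PySem.List.pySetD_of_nonneg _ _ hi0]
      by_cases hji : (j : Int) = i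
      · have : i.toNat = j := by omega
        have hjlen : j < r.length := by omega
        simp [hji, this, List.getElem?_set_self, hjlen]
      · have : i.toNat ≠ j := by omega
        simp [hji, List.getElem?_set_ne this]

-- membership in the positions list for key k
theorem pv_idx_mem (headers : List String) (k : String) (j : Nat) (hj : j < headers.length) :
    ((j : Int) ∈ ((PySem.List.enumerate headers 0).filter (fun p => pvNorm p.2 == k)).map (·.1))
      ↔ pvNorm headers[j] = k := by
  simp only [List.mem_map, List.mem_filter, PySem.List.mem_enumerate_iff]
  constructor
  · rintro ⟨p, ⟨⟨m, hm, rfl⟩, hk⟩, hj'⟩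
    obtain rfl : m = j := by simpa using hj'
    
    simpa using hk
  · intro hk
    exact ⟨((j : Int), headers[j]), ⟨⟨j, hj, by simp⟩, by simpa using hk⟩, rfl⟩

-- every index stored in positions is a valid header position
theorem pv_idx_bound (headers : List String) (k : String) (i : Int)
    (h : i ∈ ((PySem.List.enumerate headers 0).filter (fun p => pvNorm p.2 == k)).map (·.1)) :
    0 ≤ i ∧ i < (headers.length : Int) := by
  simp only [List.mem_map, List.mem_filter, PySem.List.mem_enumerate_iff] at h
  obtain ⟨p, ⟨⟨m, hm, rfl⟩, _⟩, hi⟩ := h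
  subst hi
  constructor <;> simp <;> omega

-- A's header loop, elementwise
theorem pv_loopA_get (nd : PySem.Dict String String) (hs : List String) :
    ∀ (s : Nat) (r : List (Option String)) (j : Nat),
    s + hs.length ≤ r.length →
    ((PySem.List.enumerate hs (s : Int)).foldl
        (fun row p =>
          let hn := pvNorm p.2
          if nd.contains hn then PySem.List.pySetD row p.1 (nd.get? hn) else row) r)[j]?
      = if s ≤ j ∧ j < s + hs.length ∧ nd.contains (pvNorm (hs.getD (j - s) "")) = true
        then some (nd.get? (pvNorm (hs.getD (j - s) "")))
        else r[j]? := by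
  induction hs with
  | nil =>
    intro s r j _
    simp only [PySem.List.enumerate_nil, List.foldl_nil, List.length_nil]
    rw [if_neg (by omega)]
  | cons h hs ih =>
    intro s r j hr
    rw [PySem.List.enumerate_cons]
    have hcast : (s : Int) + 1 = ((s + 1 : Nat) : Int) := by push_cast; ring
    simp only [List.foldl_cons, hcast]
    set r' := (if nd.contains (pvNorm h) then PySem.List.pySetD r (s : Int) (nd.get? (pvNorm h)) else r) with hr'
    have hlenr' : r'.length = r.length := by
      rw [hr']; split <;> simp [PySem.List.length_pySetD]
    rw [ih (s + 1) r' j (by simp only [List.length_cons] at hr; omega)]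
    have hne : j ≠ s → r'[j]? = r[j]? := by
      intro hjs
      rw [hr']; split
      · rw [PySem.List.pySetD_of_nonneg _ _ (by positivity)]
        exact List.getElem?_set_ne (by omega)
      · rfl
    by_cases hj1 : s + 1 ≤ j ∧ j < s + 1 + hs.length
    · have hgd : (h :: hs).getD (j - s) "" = hs.getD (j - (s + 1)) "" := by
        rw [show j - s = (j - (s + 1)) + 1 by omega]; rfl
      simp only [hgd, List.length_cons]
      by_cases hc : nd.contains (pvNorm (hs.getD (j - (s + 1)) "")) = true
      · rw [if_pos ⟨hj1.1, hj1.2, hc⟩, if_pos ⟨by omega, by omega, hc⟩]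
      · rw [if_neg (fun hh => hc hh.2.2), if_neg (fun hh => hc hh.2.2), hne (by omega)]
    · by_cases hjs : j = s
      · obtain rfl : j = s := hjs
        rw [if_neg (by omega)]
        simp only [Nat.sub_self, List.getD_cons_zero, List.length_cons]
        by_cases hc : nd.contains (pvNorm h) = true
        · rw [if_pos ⟨le_refl _, by omega, hc⟩, hr', if_pos hc,
              PySem.List.pySetD_of_nonneg _ _ (by positivity)]
          rw [show (j : Int).toNat = j by omega]
          exact List.getElem?_set_self (by simp only [List.length_cons] at hr; omega)
        · rw [if_neg (fun hh => hc hh.2.2), hr', if_neg hc]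
      · rw [if_neg (by omega),
            if_neg (fun hh => hj1 ⟨by omega, by simp only [List.length_cons] at hh; omega⟩),
            hne hjs]

-- B's data loop, elementwise (j a valid header position)
theorem pv_loopB_get (headers : List String) (l : List (String × String)) :
    ∀ (r : List (Option String)) (j : Nat), r.length = headers.length → ∀ (hj : j < headers.length),
    (l.foldl
        (fun row kv =>
          ((((PySem.List.enumerate headers 0).foldl
              (fun d p => d.modify (pvNorm p.2) [] (· ++ [p.1])) PySem.Dict.empty)).getD (pvNorm kv.1) []).foldl
            (fun r i => PySem.List.pySetD r i (some kv.2)) row) r)[j]?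
      = match l.reverse.find? (fun kv => pvNorm kv.1 == pvNorm headers[j]) with
        | some kv => some (some kv.2)
        | none => r[j]? := by
  induction l with
  | nil => intro r j _ _; simp
  | cons kv l ih =>
    intro r j hlen hj
    have hpos : (((PySem.List.enumerate headers 0).foldl
        (fun d p => d.modify (pvNorm p.2) [] (· ++ [p.1])) PySem.Dict.empty)).getD (pvNorm kv.1) []
        = ((PySem.List.enumerate headers 0).filter (fun p => pvNorm p.2 == pvNorm kv.1)).map (·.1) := by
      rw [pv_positions_getD]; simp
    set is := ((PySem.List.enumerate headers 0).filter (fun p => pvNorm p.2 == pvNorm kv.1)).map (·.1) with his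
    have hlen' : (is.foldl (fun r i => PySem.List.pySetD r i (some kv.2)) r).length = r.length :=
      pv_foldl_len _ _ (fun r x => PySem.List.length_pySetD ..) r
    rw [List.foldl_cons, hpos, ih _ j (by rw [hlen', hlen]) hj]
    simp only [List.reverse_cons, List.find?_append]
    cases hfind : l.reverse.find? (fun kv => pvNorm kv.1 == pvNorm headers[j]) with
    | some p => simp
    | none =>
      simp only [Option.orElse_eq_or, Option.none_or]
      rw [pv_setfold_get _ _ _ _ (by intro i hi; rw [hlen]; exact pv_idx_bound headers _ i hi)]
      rw [his]
      by_cases hk : pvNorm kv.1 = pvNorm headers[j]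
      · rw [if_pos ((pv_idx_mem headers _ j hj).2 hk.symm),
            List.find?_cons_of_pos (by simp [hk])]
      · rw [if_neg (fun hmem => hk ((pv_idx_mem headers _ j hj).1 hmem).symm),
            List.find?_cons_of_neg (by simp [hk]), List.find?_nil]

-- ===== VERDICT (by name: the statement is the Claim_ definition above) =====
theorem map_row_data_spec : Claim_equal_map_row_data := by
  intro data_dict headers _
  unfold Spec_map_row_data map_row_data map_row_data_alt
  simp only []
  apply List.ext_getElem?
  intro j
  have hlenA : ∀ (r : List (Option String)),
      ((PySem.List.enumerate headers 0).foldl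
        (fun row p =>
          let hn := pvNorm p.2
          if (data_dict.foldl (fun d kv => d.insert (pvNorm kv.1) kv.2) PySem.Dict.empty).contains hn
          then PySem.List.pySetD row p.1 ((data_dict.foldl (fun d kv => d.insert (pvNorm kv.1) kv.2) PySem.Dict.empty).get? hn) else row) r).length = r.length := by
    intro r
    apply pv_foldl_len
    intro r x
    dsimp only
    split <;> simp [PySem.List.length_pySetD]
  by_cases hj : j < headers.length
  · have hA := pv_loopA_get (data_dict.foldl (fun d kv => d.insert (pvNorm kv.1) kv.2) PySem.Dict.empty)
      headers 0 (List.replicate headers.length none) j (by simp)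
    have hB := pv_loopB_get headers data_dict (List.replicate headers.length none) j (by simp) hj
    rw [show ((0 : Nat) : Int) = (0 : Int) by simp] at hA
    rw [hA, hB]
    have hget : headers.getD (j - 0) "" = headers[j] := by
      simp [List.getD, hj, List.getElem?_eq_getElem]
    rw [hget]
    rw [pv_dictA_get]
    cases hfind : data_dict.reverse.find? (fun kv => pvNorm kv.1 == pvNorm headers[j]) with
    | some p =>
      have hcont : (data_dict.foldl (fun d kv => d.insert (pvNorm kv.1) kv.2) PySem.Dict.empty).contains (pvNorm headers[j]) = true := by
        rw [PySem.Dict.contains_eq_isSome_get?, pv_dictA_get, hfind]; rfl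
      rw [if_pos ⟨Nat.zero_le _, by omega, hcont⟩]
    | none =>
      have hcont : (data_dict.foldl (fun d kv => d.insert (pvNorm kv.1) kv.2) PySem.Dict.empty).contains (pvNorm headers[j]) = false := by
        rw [PySem.Dict.contains_eq_isSome_get?, pv_dictA_get, hfind]; rfl
      simp [hcont, hfind]
  · -- out of range on both sides: both results have length headers.length
    rw [List.getElem?_eq_none (by rw [hlenA]; simpa using le_of_not_gt hj),
        List.getElem?_eq_none (by
          rw [pv_foldl_len _ _ (fun r x => pv_foldl_len _ _ (fun r i => PySem.List.length_pySetD ..) r)]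
          simpa using le_of_not_gt hj)]
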